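-- pv_equiv track=rewrite | github.com/iglabari/ClaraFold | ClaraFold.py | identify_pseudoknot_blocks
-- ===== SOURCE A (Python) =====
-- def identify_pseudoknot_blocks(structure):
--     """
--     Identifica bloques continuos que contienen pseudonudos, incluyendo puntos intermedios.
--     Un bloque comienza con el primer '<' o '>' y termina cuando hay una secuencia
--     de al menos 2 caracteres que no son '<', '>' ni puntos.
--
--     Args:
--         structure (str): Estructura RNA
--
--     Returns:
--         list: Lista de tuplas (inicio, fin) de cada bloque de pseudonudos
--     """
--     blocks = []
--     i = 0
--     length = len(structure)
--
--     while i < length: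
--         # Buscar el inicio de un bloque (primer '<' o '>')
--         if structure[i] in '<>':
--             start = i
--             # Avanzar mientras encontremos '<', '>' o puntos
--             # con no más de 1 punto consecutivo entre símbolos de pseudonudos
--             consecutive_dots = 0
--             last_pseudoknot_pos = i
--
--             while i < length:
--                 if structure[i] in '<>':
--                     consecutive_dots = 0
--                     last_pseudoknot_pos = i
--                 elif structure[i] == '.':
--                     consecutive_dots += 1
--                     # Si hay más de 1 punto consecutivo y estamos lejos del último pseudonudo,
--                     # consideramos que es el fin del bloque
--                     if consecutive_dots > 1 and (i - last_pseudoknot_pos) > 1: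
--                         break
--                 else:
--                     # Si encontramos otro carácter, es el fin del bloque
--                     break
--                 i += 1
--
--             # El fin del bloque es la última posición de pseudonudo encontrada
--             end = last_pseudoknot_pos
--
--             # Solo guardar bloques que tengan al menos un pseudonudo
--             if start <= end:
--                 blocks.append((start, end))
--         else:
--             i += 1
--
--     return blocks
-- ===== SOURCE B (Python) =====
-- def identify_pseudoknot_blocks(structure):
--     """Blocks = groups of '<'/'>' positions where consecutive symbols are
--     adjacent or separated by exactly one dot; returns (first, last) of each group."""
--     positions = [i for i, c in enumerate(structure) if c in '<>']
--     blocks = []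
--     for p in positions:
--         if blocks and (p - blocks[-1][1] == 1 or
--                        (p - blocks[-1][1] == 2 and structure[p - 1] == '.')):
--             blocks[-1] = (blocks[-1][0], p)
--         else:
--             blocks.append((p, p))
--     return blocks
-- ===== Notes on version B (the rewrite author's own statement) =====
-- stated objective: simpler
-- what changed: A's nested while loops with index, consecutive-dot counter and last-symbol bookkeeping are replaced by a two-step decomposition: collect all pseudoknot-symbol positions, then group consecutive positions that are adjacent or separated by exactly one dot, each group giving one (first,last) block.
import Mathlib
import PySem

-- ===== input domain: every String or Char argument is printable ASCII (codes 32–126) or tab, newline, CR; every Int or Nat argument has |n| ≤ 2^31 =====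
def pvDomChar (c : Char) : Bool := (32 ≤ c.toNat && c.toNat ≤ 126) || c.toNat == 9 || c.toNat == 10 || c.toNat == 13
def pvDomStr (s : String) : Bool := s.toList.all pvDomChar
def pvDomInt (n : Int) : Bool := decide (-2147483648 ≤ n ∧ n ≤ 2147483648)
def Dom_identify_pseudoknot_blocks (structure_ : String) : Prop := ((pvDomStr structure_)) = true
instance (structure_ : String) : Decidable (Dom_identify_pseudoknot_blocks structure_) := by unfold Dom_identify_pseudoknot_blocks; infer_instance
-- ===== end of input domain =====

-- B replaces A's nested while loops (index/dot-counter state machine) by a simpler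
-- two-step decomposition: collect the symbol positions, then group consecutive
-- positions that are adjacent or separated by exactly one dot (objective: simpler).

-- ===== PORT A =====
-- char in '<>'
def pvSym (c : Char) : Bool := c == '<' || c == '>'

-- A's inner while loop, state (i, consecutive_dots, last_pseudoknot_pos); returns
-- (i, last_pseudoknot_pos) at exit. fuel only makes the while loop structurally
-- total: with fuel ≥ length - i (always the case as called) it never runs out,
-- and running out returns the same (i, last) the i ≥ length exit returns.
def pvInnerA (cs : List Char) : Nat → Nat → Nat → Nat → Nat × Nat
  | 0, i, _, last => (i, last)
  | fuel+1, i, cd, last =>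
    if h : i < cs.length then
      if pvSym cs[i] then pvInnerA cs fuel (i+1) 0 i
      else if cs[i] == '.' then
        if cd + 1 > 1 && i - last > 1 then (i, last)
        else pvInnerA cs fuel (i+1) (cd+1) last
      else (i, last)
    else (i, last)

-- A's outer while loop; when cs[i] is a symbol, the first inner iteration (which
-- sets consecutive_dots := 0, last := i and moves to i+1) is folded into the call,
-- and start = i, end = (pvInnerA …).2 are written inline. Same fuel discipline.
def pvLoopA (cs : List Char) : Nat → Nat → List (Int × Int) → List (Int × Int)
  | 0, _, blocks => blocks
  | fuel+1, i, blocks =>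
    if h : i < cs.length then
      if pvSym cs[i] then
        pvLoopA cs fuel (pvInnerA cs cs.length (i+1) 0 i).1
          (if i ≤ (pvInnerA cs cs.length (i+1) 0 i).2 then
            blocks ++ [((i : Int), ((pvInnerA cs cs.length (i+1) 0 i).2 : Int))]
          else blocks)
      else pvLoopA cs fuel (i+1) blocks
    else blocks

def identify_pseudoknot_blocks (structure_ : String) : List (Int × Int) :=
  pvLoopA structure_.toList structure_.toList.length 0 []

-- ===== PORT B =====
-- p joins the block ending at e: adjacent, or two apart with a dot in between
def pvLink (cs : List Char) (e p : Int) : Bool :=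
  p - e == 1 || (p - e == 2 && PySem.List.pyGet? cs (p - 1) == some '.')

-- body of B's for-loop (blocks kept newest-first; reversed at the end)
def pvStepB (cs : List Char) (acc : List (Int × Int)) (p : Int) : List (Int × Int) :=
  match acc with
  | (st, en) :: rest => if pvLink cs en p then (st, p) :: rest else (p, p) :: (st, en) :: rest
  | [] => [(p, p)]

def identify_pseudoknot_blocks_alt (structure_ : String) : List (Int × Int) :=
  let cs := structure_.toList
  let positions := ((PySem.List.enumerate cs).filter (fun ic => pvSym ic.2)).map (·.1)
  (positions.foldl (pvStepB cs) []).reverse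

-- ===== PRECONDITION & SPEC =====
def Spec_identify_pseudoknot_blocks (structure_ : String) (out : List (Int × Int)) : Prop := out = identify_pseudoknot_blocks_alt structure_
instance (structure_ : String) (out : List (Int × Int)) : Decidable (Spec_identify_pseudoknot_blocks structure_ out) := by unfold Spec_identify_pseudoknot_blocks; infer_instance

-- ===== CLAIM (what is proved, stated in full; the proofs are below) =====
def Claim_equal_identify_pseudoknot_blocks : Prop := ∀ (structure_ : String), Dom_identify_pseudoknot_blocks structure_ → Spec_identify_pseudoknot_blocks structure_ (identify_pseudoknot_blocks structure_)

-- ===== LEMMAS AND PROOFS =====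

-- pvInnerA does not depend on the fuel once fuel ≥ length - i
theorem pvInnerA_fuel (cs : List Char) : ∀ (f1 f2 i cd last : Nat),
    cs.length - i ≤ f1 → cs.length - i ≤ f2 →
    pvInnerA cs f1 i cd last = pvInnerA cs f2 i cd last := by
  intro f1
  induction f1 with
  | zero =>
    intro f2 i cd last h1 h2
    cases f2 with
    | zero => rfl
    | succ f2 => rw [pvInnerA, pvInnerA, dif_neg (by omega)]
  | succ f1 ih =>
    intro f2 i cd last h1 h2
    cases f2 with
    | zero => rw [pvInnerA, pvInnerA, dif_neg (by omega)]
    | succ f2 =>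
      rw [pvInnerA, pvInnerA]
      split_ifs
      · exact ih f2 (i+1) 0 i (by omega) (by omega)
      · rfl
      · exact ih f2 (i+1) (cd+1) last (by omega) (by omega)
      · rfl
      · rfl

-- one unfolding step of pvInnerA at the fuel the port uses
theorem pvInnerA_unfold (cs : List Char) (i cd last : Nat) :
    pvInnerA cs cs.length i cd last =
      if h : i < cs.length then
        if pvSym cs[i] then pvInnerA cs cs.length (i+1) 0 i
        else if cs[i] == '.' then
          if cd + 1 > 1 && i - last > 1 then (i, last)
          else pvInnerA cs cs.length (i+1) (cd+1) last
        else (i, last)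
      else (i, last) := by
  rw [pvInnerA_fuel cs cs.length (cs.length + 1) i cd last (by omega) (by omega), pvInnerA]

-- the inner loop only moves the index forward
theorem pvInnerA_fst_ge (cs : List Char) : ∀ (fuel i cd last : Nat),
    i ≤ (pvInnerA cs fuel i cd last).1 := by
  intro fuel
  induction fuel with
  | zero => intro i cd last; rw [pvInnerA]
  | succ fuel ih =>
    intro i cd last
    rw [pvInnerA]
    split_ifs <;>
      first
        | simp
        | (have := ih (i+1) 0 i; omega)
        | (have := ih (i+1) (cd+1) last; omega)

-- the inner loop never moves last_pseudoknot_pos backwards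
theorem pvInnerA_snd_ge (cs : List Char) : ∀ (fuel i cd last : Nat), last ≤ i →
    last ≤ (pvInnerA cs fuel i cd last).2 := by
  intro fuel
  induction fuel with
  | zero => intro i cd last h; rw [pvInnerA]
  | succ fuel ih =>
    intro i cd last h
    rw [pvInnerA]
    split_ifs <;>
      first
        | simpa
        | (have := ih (i+1) 0 i (by omega); omega)
        | (have := ih (i+1) (cd+1) last (by omega); omega)

-- positions (as Ints) of the symbols of cs at indices ≥ i
def pvPosFrom (cs : List Char) (i : Nat) : List Int :=
  if h : i < cs.length then
    if pvSym cs[i] then (i : Int) :: pvPosFrom cs (i+1) else pvPosFrom cs (i+1)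
  else []
termination_by cs.length - i

theorem pvPosFrom_ge (cs : List Char) (i : Nat) : ∀ q ∈ pvPosFrom cs i, (i : Int) ≤ q := by
  induction i using pvPosFrom.induct cs with
  | case1 i h hs ih =>
    rw [pvPosFrom]; simp only [h, hs, dif_pos, if_pos]
    intro q hq
    rcases List.mem_cons.1 hq with rfl | hq
    · omega
    · have := ih q hq; omega
  | case2 i h hs ih =>
    rw [pvPosFrom]; simp only [h, hs, dif_pos, if_neg, Bool.not_eq_true]
    intro q hq; have := ih q hq; omega
  | case3 i h => rw [pvPosFrom]; simp [h]

-- B's comprehension computes the symbol positions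
theorem pvPositions_eq (cs : List Char) : ∀ i, i ≤ cs.length →
    ((PySem.List.enumerate (cs.drop i) (i : Int)).filter (fun ic => pvSym ic.2)).map (·.1) = pvPosFrom cs i := by
  intro i
  induction i using pvPosFrom.induct cs with
  | case1 i h hs ih =>
    intro _
    have e1 : (i : Int) + 1 = ((i+1 : Nat) : Int) := by push_cast; ring
    rw [List.drop_eq_getElem_cons h, PySem.List.enumerate_cons, pvPosFrom, dif_pos h,
        if_pos hs, List.filter_cons, if_pos (by simpa using hs), List.map_cons, e1, ih (by omega)]
  | case2 i h hs ih =>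
    intro _
    have e1 : (i : Int) + 1 = ((i+1 : Nat) : Int) := by push_cast; ring
    rw [List.drop_eq_getElem_cons h, PySem.List.enumerate_cons, pvPosFrom, dif_pos h,
        if_neg hs, List.filter_cons, if_neg (by simpa using hs), e1, ih (by omega)]
  | case3 i h =>
    intro hle
    have : i = cs.length := by omega
    subst this
    rw [pvPosFrom]; simp

-- B's grouping, recursively: pvGo carries the open block (s, e)
def pvGo (cs : List Char) (s e : Int) : List Int → List (Int × Int)
  | [] => [(s, e)]
  | q :: qs => if pvLink cs e q then pvGo cs s q qs else (s, e) :: pvGo cs q q qs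

def pvG (cs : List Char) : List Int → List (Int × Int)
  | [] => []
  | p :: ps => pvGo cs p p ps

-- B's foldl with newest-first accumulator computes pvGo/pvG
theorem pvFold_go (cs : List Char) : ∀ (ps : List Int) (s e : Int) (rest : List (Int × Int)),
    (ps.foldl (pvStepB cs) ((s, e) :: rest)).reverse = rest.reverse ++ pvGo cs s e ps := by
  intro ps
  induction ps with
  | nil => intro s e rest; simp [pvGo]
  | cons q qs ih =>
    intro s e rest
    simp only [List.foldl_cons, pvStepB, pvGo]
    by_cases h : pvLink cs e q = true
    · simp [h, ih]
    · simp only [h]; simp at h; simp [h, ih]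

theorem pvFold_g (cs : List Char) (ps : List Int) :
    (ps.foldl (pvStepB cs) []).reverse = pvG cs ps := by
  cases ps with
  | nil => simp [pvG]
  | cons p ps => simp [pvStepB, pvG, pvFold_go]

-- evaluations of pvLink
theorem pvGo_break (cs : List Char) (s : Int) (p : Nat) (ps : List Int)
    (hlink : ∀ q ∈ ps, pvLink cs (p : Int) q = false) :
    pvGo cs s (p : Int) ps = (s, (p : Int)) :: pvG cs ps := by
  cases ps with
  | nil => simp [pvGo, pvG]
  | cons q qs => simp [pvGo, pvG, hlink q (by simp)]

theorem pvLink_succ (cs : List Char) (p : Nat) : pvLink cs (p : Int) ((p+1 : Nat) : Int) = true := by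
  simp [pvLink]

theorem pvLink_dot (cs : List Char) (p : Nat) (h : cs[p+1]? = some '.') :
    pvLink cs (p : Int) ((p+2 : Nat) : Int) = true := by
  have e1 : ((p+2 : Nat) : Int) - 1 = ((p+1 : Nat) : Int) := by push_cast; ring
  rw [pvLink, e1, PySem.List.pyGet?_natCast, h]
  simp

theorem pvLink_far (cs : List Char) (p : Nat) (q : Int) (hq : ((p+3 : Nat) : Int) ≤ q) :
    pvLink cs (p : Int) q = false := by
  have h1 : ¬ (q - (p:Int) = 1) := by omega
  have h2 : ¬ (q - (p:Int) = 2) := by omega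
  simp [pvLink, h1, h2]

theorem pvLink_no_dot (cs : List Char) (p : Nat) (q : Int) (hq : ((p+2 : Nat) : Int) ≤ q)
    (h : cs[p+1]? ≠ some '.') : pvLink cs (p : Int) q = false := by
  by_cases h2 : q = ((p+2 : Nat) : Int)
  · subst h2
    have e1 : ((p+2 : Nat) : Int) - 1 = ((p+1 : Nat) : Int) := by push_cast; ring
    rw [pvLink, e1, PySem.List.pyGet?_natCast]
    simp [h]
  · apply pvLink_far; omega

-- A's inner loop computes exactly one group of B: starting at symbol position p,
-- it ends the block at B's group end and resumes where B's next group can start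
theorem pvInner_go (cs : List Char) : ∀ (n p : Nat) (s : Int), cs.length - p ≤ n →
    pvGo cs s (p : Int) (pvPosFrom cs (p+1)) =
      (s, ((pvInnerA cs cs.length (p+1) 0 p).2 : Int)) ::
        pvG cs (pvPosFrom cs (pvInnerA cs cs.length (p+1) 0 p).1) := by
  intro n
  induction n with
  | zero =>
    intro p s hn
    have h1 : ¬ (p + 1 < cs.length) := by omega
    rw [pvInnerA_unfold, dif_neg h1, pvPosFrom, dif_neg h1]
    simp [pvGo, pvG]
  | succ n ih =>
    intro p s hn
    by_cases h1 : p + 1 < cs.length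
    · by_cases hs1 : pvSym cs[p+1]
      · -- symbol at p+1: linked, block continues
        rw [pvInnerA_unfold, dif_pos h1, if_pos hs1, pvPosFrom, dif_pos h1, if_pos hs1,
            pvGo, if_pos (pvLink_succ cs p)]
        exact ih (p+1) s (by omega)
      · by_cases hd1 : cs[p+1] = '.'
        · -- dot at p+1: inner moves to p+2 with consecutive_dots = 1
          have hstep : pvInnerA cs cs.length (p+1) 0 p = pvInnerA cs cs.length (p+2) 1 p := by
            rw [pvInnerA_unfold, dif_pos h1, if_neg hs1, if_pos (by simp [hd1]), if_neg (by simp)]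
          have hpos1 : pvPosFrom cs (p+1) = pvPosFrom cs (p+2) := by
            rw [pvPosFrom, dif_pos h1, if_neg hs1]
          by_cases h2 : p + 2 < cs.length
          · by_cases hs2 : pvSym cs[p+2]
            · -- symbol at p+2: linked via the single dot, block continues
              have hstep2 : pvInnerA cs cs.length (p+2) 1 p = pvInnerA cs cs.length (p+3) 0 (p+2) := by
                rw [pvInnerA_unfold, dif_pos h2, if_pos hs2]
              have hdot : cs[p+1]? = some '.' := by rw [List.getElem?_eq_getElem h1, hd1]
              rw [hstep, hstep2, hpos1, pvPosFrom, dif_pos h2, if_pos hs2,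
                  pvGo, if_pos (pvLink_dot cs p hdot)]
              exact ih (p+2) s (by omega)
            · -- non-symbol at p+2: inner stops at p+2 with last = p; block breaks
              have hstep2 : pvInnerA cs cs.length (p+2) 1 p = (p+2, p) := by
                rw [pvInnerA_unfold, dif_pos h2, if_neg hs2]
                by_cases hdd : cs[p+2] == '.'
                · rw [if_pos hdd, if_pos (by simp only [Bool.and_eq_true, decide_eq_true_iff]; omega)]
                · rw [if_neg hdd]
              have hpos2 : pvPosFrom cs (p+2) = pvPosFrom cs (p+3) := by
                rw [pvPosFrom, dif_pos h2, if_neg hs2]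
              rw [hstep, hstep2, hpos1, hpos2]
              exact pvGo_break cs s p _ (fun q hq => pvLink_far cs p q (pvPosFrom_ge cs (p+3) q hq))
          · -- p+2 past the end: inner stops at p+2, no positions left
            have hstep2 : pvInnerA cs cs.length (p+2) 1 p = (p+2, p) := by
              rw [pvInnerA_unfold, dif_neg h2]
            have hpos2 : pvPosFrom cs (p+2) = [] := by
              rw [pvPosFrom, dif_neg h2]
            rw [hstep, hstep2, hpos1, hpos2]
            simp [pvGo, pvG]
        · -- other char at p+1: inner stops at p+1 with last = p; block breaks
          have hstep : pvInnerA cs cs.length (p+1) 0 p = (p+1, p) := by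
            rw [pvInnerA_unfold, dif_pos h1, if_neg hs1, if_neg (by simp [hd1])]
          have hpos1 : pvPosFrom cs (p+1) = pvPosFrom cs (p+2) := by
            rw [pvPosFrom, dif_pos h1, if_neg hs1]
          have hnd : cs[p+1]? ≠ some '.' := by rw [List.getElem?_eq_getElem h1]; simp [hd1]
          rw [hstep, hpos1]
          exact pvGo_break cs s p _ (fun q hq =>
            pvLink_no_dot cs p q (pvPosFrom_ge cs (p+2) q hq) hnd)
    · -- p+1 past the end
      rw [pvInnerA_unfold, dif_neg h1, pvPosFrom, dif_neg h1]
      simp [pvGo, pvG]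

-- A's outer loop computes B's grouping of the symbol positions
theorem pvLoop_g (cs : List Char) : ∀ (fuel i : Nat) (bs : List (Int × Int)), cs.length - i ≤ fuel →
    pvLoopA cs fuel i bs = bs ++ pvG cs (pvPosFrom cs i) := by
  intro fuel
  induction fuel with
  | zero =>
    intro i bs hn
    rw [pvLoopA, pvPosFrom, dif_neg (by omega)]; simp [pvG]
  | succ fuel ih =>
    intro i bs hn
    by_cases h : i < cs.length
    · by_cases hs : pvSym cs[i]
      · have hge := pvInnerA_fst_ge cs cs.length (i+1) 0 i
        have hsnd := pvInnerA_snd_ge cs cs.length (i+1) 0 i (by omega)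
        rw [pvLoopA, dif_pos h, if_pos hs, if_pos hsnd, ih _ _ (by omega)]
        conv_rhs => rw [pvPosFrom, dif_pos h, if_pos hs]
        have hig := pvInner_go cs cs.length i (i : Int) (by omega)
        simp [pvG, hig]
      · rw [pvLoopA, dif_pos h, if_neg hs, ih _ _ (by omega)]
        conv_rhs => rw [pvPosFrom, dif_pos h, if_neg hs]
    · rw [pvLoopA, dif_neg h, pvPosFrom, dif_neg h]; simp [pvG]

-- ===== VERDICT (by name: the statement is the Claim_ definition above) =====
theorem identify_pseudoknot_blocks_spec : Claim_equal_identify_pseudoknot_blocks := by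
  intro s _
  unfold Spec_identify_pseudoknot_blocks identify_pseudoknot_blocks identify_pseudoknot_blocks_alt
  have hp := pvPositions_eq s.toList 0 (Nat.zero_le _)
  simp only [List.drop_zero, Nat.cast_zero] at hp
  rw [pvLoop_g s.toList s.toList.length 0 [] (by omega)]
  simp [hp, pvFold_g]
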